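-- pv_equiv track=rewrite | github.com/RookieWookiee/Programming101-Python-2018 | week02/01.PythonFinalRound/finalround.py | elevator_trips
-- ===== SOURCE A (Python) =====
-- from collections import deque
--
-- def elevator_trips(p_weight, p_floors, elevator_floors, max_ppl, max_w):
--     def takewhile(predicate, iterable):
--         count = 0
--         total_weight = 0
--         result = []
--
--         for x in iterable:
--             count += 1
--             total_weight += x[0]
--             if predicate(count, total_weight):
--                 result.append(x)
--             else:
--                 break
--
--         return result
--
--     if len(p_weight) == 0 or len(p_floors) == 0:
--         return 0
--     if any(w > max_w for w in p_weight):
--         raise ValueError('Take the stairs')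
--
--     p_weight = p_weight[:len(p_floors)]
--
--     people = zip(p_weight, p_floors)
--     # Sort by weight, then by floor
--     people = deque(x for x in sorted(people, key=lambda p: (p[0], p[1])))
--     trips = 0
--
--     while(len(people) > 0):
--         batch = takewhile(lambda c, w: c <= max_ppl and w <= max_w, people)
--         [people.popleft() for x in batch]
--         # +1 because of the return to floor 0
--         trips += len(set(x[1] for x in batch)) + 1
--
--     return trips
-- ===== SOURCE B (Python) =====
-- def elevator_trips(p_weight, p_floors, elevator_floors, max_ppl, max_w):
--     if len(p_weight) == 0 or len(p_floors) == 0: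
--         return 0
--     if any(w > max_w for w in p_weight):
--         raise ValueError('Take the stairs')
--
--     people = sorted(zip(p_weight, p_floors), key=lambda p: (p[0], p[1]))
--
--     trips = 0
--     cur_count = 0
--     cur_weight = 0
--     cur_floors = set()
--     for w, f in people:
--         if cur_count + 1 <= max_ppl and cur_weight + w <= max_w:
--             cur_count += 1
--             cur_weight += w
--             cur_floors.add(f)
--         else:
--             trips += len(cur_floors) + 1
--             cur_count = 1
--             cur_weight = w
--             cur_floors = {f}
--     trips += len(cur_floors) + 1
--     return trips
-- ===== Notes on version B (the rewrite author's own statement) =====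
-- stated objective: simpler
-- what changed: Replaced the deque + per-trip takewhile helper (which rebuilds each batch and pops it element by element) with a single flat pass over the sorted list that maintains running count, weight and a floor set, flushing a trip when the next person does not fit; Pre_ excludes inputs where A raises ValueError (some weight > max_w with nonempty lists) or loops forever (max_ppl <= 0 with nonempty lists).
import Mathlib
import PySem

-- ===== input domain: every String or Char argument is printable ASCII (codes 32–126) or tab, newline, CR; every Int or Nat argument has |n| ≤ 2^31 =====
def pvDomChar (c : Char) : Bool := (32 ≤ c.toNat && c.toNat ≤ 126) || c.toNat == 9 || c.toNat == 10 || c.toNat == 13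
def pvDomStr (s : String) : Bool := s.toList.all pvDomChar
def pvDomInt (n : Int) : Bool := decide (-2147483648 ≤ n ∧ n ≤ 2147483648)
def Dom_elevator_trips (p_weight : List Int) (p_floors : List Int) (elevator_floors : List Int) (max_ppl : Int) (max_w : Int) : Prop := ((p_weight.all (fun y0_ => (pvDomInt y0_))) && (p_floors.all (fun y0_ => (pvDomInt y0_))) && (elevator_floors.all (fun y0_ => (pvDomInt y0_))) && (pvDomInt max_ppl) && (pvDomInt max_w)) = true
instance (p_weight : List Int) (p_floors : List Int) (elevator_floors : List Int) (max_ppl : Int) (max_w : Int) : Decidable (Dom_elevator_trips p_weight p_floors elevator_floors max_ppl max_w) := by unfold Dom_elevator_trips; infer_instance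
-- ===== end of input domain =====

-- B replaces A's deque + per-trip takewhile helper by one flat pass over the sorted list with a
-- running count/weight/floor-set accumulator (objective: simpler). Equivalence is about the return
-- value on Pre_ (A raises ValueError or loops forever outside it).

-- ===== PORT A =====
-- A's inner 'takewhile' helper: count/total_weight accumulated, predicate checked after adding
def twA (max_ppl max_w : Int) (count total_weight : Int) : List (Int × Int) → List (Int × Int)
  | [] => []
  | x :: xs =>
    let count' := count + 1
    let total' := total_weight + x.1
    if count' ≤ max_ppl ∧ total' ≤ max_w then x :: twA max_ppl max_w count' total' xs
    else []

-- A's 'while len(people) > 0' loop; the fuel only makes it total (the Python loops forever when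
-- max_ppl ≤ 0 and the lists are nonempty — those inputs are outside Pre_)
def loopA (max_ppl max_w : Int) : Nat → List (Int × Int) → Int → Int
  | 0, _, trips => trips
  | fuel + 1, people, trips =>
    if people.length > 0 then
      let batch := twA max_ppl max_w 0 0 people
      let people' := people.drop batch.length          -- [people.popleft() for x in batch]
      loopA max_ppl max_w fuel people'
        (trips + ((PySem.Set.ofList (batch.map (·.2))).length : Int) + 1)
    else trips

def elevator_trips (p_weight : List Int) (p_floors : List Int) (elevator_floors : List Int) (max_ppl : Int) (max_w : Int) : Int :=
  if p_weight.length = 0 ∨ p_floors.length = 0 then 0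
  else if p_weight.any (fun w => w > max_w) then 0     -- raise ValueError('Take the stairs'): outside Pre_
  else
    let p_weight' := PySem.List.slice p_weight none (some (p_floors.length : Int))
    let people := PySem.List.sorted2 (List.zip p_weight' p_floors) (fun p => p.1) (fun p => p.2)
    loopA max_ppl max_w people.length people 0

-- ===== PORT B =====
-- one step of B's flat pass; state = (cur_count, cur_weight, cur_floors, trips)
def stepB (max_ppl max_w : Int) (st : Int × Int × PySem.Set Int × Int) (p : Int × Int) : Int × Int × PySem.Set Int × Int :=
  if st.1 + 1 ≤ max_ppl ∧ st.2.1 + p.1 ≤ max_w then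
    (st.1 + 1, st.2.1 + p.1, PySem.Set.add st.2.2.1 p.2, st.2.2.2)
  else
    (1, p.1, PySem.Set.add PySem.Set.empty p.2, st.2.2.2 + ((st.2.2.1).length : Int) + 1)

def elevator_trips_alt (p_weight : List Int) (p_floors : List Int) (elevator_floors : List Int) (max_ppl : Int) (max_w : Int) : Int :=
  if p_weight.length = 0 ∨ p_floors.length = 0 then 0
  else if p_weight.any (fun w => w > max_w) then 0     -- raise ValueError('Take the stairs'): outside Pre_
  else
    let people := PySem.List.sorted2 (List.zip p_weight p_floors) (fun p => p.1) (fun p => p.2)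
    let st := people.foldl (stepB max_ppl max_w) (0, 0, PySem.Set.empty, 0)
    st.2.2.2 + ((st.2.2.1).length : Int) + 1           -- trips += len(cur_floors) + 1 after the loop

-- ===== PRECONDITION & SPEC =====
-- Pre_ excludes exactly the inputs where A does not return: nonempty lists with a weight > max_w
-- (ValueError) and nonempty lists with max_ppl ≤ 0 (A's while loop never terminates).
def Pre_elevator_trips (p_weight : List Int) (p_floors : List Int) (elevator_floors : List Int) (max_ppl : Int) (max_w : Int) : Prop :=
  (p_weight = [] ∨ p_floors = []) ∨ ((∀ w ∈ p_weight, w ≤ max_w) ∧ 1 ≤ max_ppl)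
instance (p_weight : List Int) (p_floors : List Int) (elevator_floors : List Int) (max_ppl : Int) (max_w : Int) : Decidable (Pre_elevator_trips p_weight p_floors elevator_floors max_ppl max_w) := by unfold Pre_elevator_trips; infer_instance

def pvWitness_elevator_trips : List Int × List Int × List Int × Int × Int := ([3, 1, 2], [0, 2, 1], [], 2, 5)

def Spec_elevator_trips (p_weight : List Int) (p_floors : List Int) (elevator_floors : List Int) (max_ppl : Int) (max_w : Int) (out : Int) : Prop := out = elevator_trips_alt p_weight p_floors elevator_floors max_ppl max_w
instance (p_weight : List Int) (p_floors : List Int) (elevator_floors : List Int) (max_ppl : Int) (max_w : Int) (out : Int) : Decidable (Spec_elevator_trips p_weight p_floors elevator_floors max_ppl max_w out) := by unfold Spec_elevator_trips; infer_instance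

-- ===== CLAIM (what is proved, stated in full; the proofs are below) =====
def Claim_equal_elevator_trips : Prop := ∀ (p_weight : List Int) (p_floors : List Int) (elevator_floors : List Int) (max_ppl : Int) (max_w : Int), Dom_elevator_trips p_weight p_floors elevator_floors max_ppl max_w → Pre_elevator_trips p_weight p_floors elevator_floors max_ppl max_w → Spec_elevator_trips p_weight p_floors elevator_floors max_ppl max_w (elevator_trips p_weight p_floors elevator_floors max_ppl max_w)

-- ===== LEMMAS AND PROOFS =====

theorem loopA_nil (max_ppl max_w : Int) (f : Nat) (t : Int) : loopA max_ppl max_w f [] t = t := by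
  cases f <;> simp [loopA]

theorem loopA_succ (max_ppl max_w : Int) (f : Nat) (people : List (Int × Int)) (t : Int) :
    loopA max_ppl max_w (f + 1) people t =
      if people.length > 0 then
        loopA max_ppl max_w f (people.drop (twA max_ppl max_w 0 0 people).length)
          (t + ((PySem.Set.ofList ((twA max_ppl max_w 0 0 people).map (·.2))).length : Int) + 1)
      else t := rfl

-- A's takewhile always takes the head when 1 ≤ max_ppl and the head's weight is admissible
theorem twA_cons (max_ppl max_w : Int) (hmp : 1 ≤ max_ppl) (x : Int × Int) (hx : x.1 ≤ max_w)
    (xs : List (Int × Int)) :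
    twA max_ppl max_w 0 0 (x :: xs) = x :: twA max_ppl max_w 1 x.1 xs := by
  simp only [twA]
  rw [if_pos ⟨by omega, by omega⟩]
  norm_num

-- fuel irrelevance of loopA: any fuel ≥ length gives the same value (batches are nonempty)
theorem loopA_fuel (max_ppl max_w : Int) (hmp : 1 ≤ max_ppl) :
    ∀ (n : Nat) (L : List (Int × Int)), (∀ p ∈ L, p.1 ≤ max_w) → L.length = n →
    ∀ (f g : Nat) (t : Int), n ≤ f → n ≤ g →
    loopA max_ppl max_w f L t = loopA max_ppl max_w g L t := by
  intro n
  induction n using Nat.strong_induction_on with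
  | _ n ih =>
    intro L hw hlen f g t hf hg
    cases L with
    | nil => rw [loopA_nil, loopA_nil]
    | cons x xs =>
      have hn : 1 ≤ n := by simp at hlen; omega
      obtain ⟨f', rfl⟩ : ∃ f', f = f' + 1 := ⟨f - 1, by omega⟩
      obtain ⟨g', rfl⟩ : ∃ g', g = g' + 1 := ⟨g - 1, by omega⟩
      have hbatch := twA_cons max_ppl max_w hmp x (hw x (by simp)) xs
      simp only [loopA, List.length_cons, hbatch]
      rw [if_pos (by omega), if_pos (by omega)]
      simp only [List.length_cons, List.drop_succ_cons]
      set L' := xs.drop (twA max_ppl max_w 1 x.1 xs).length with hL'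
      have hlt : L'.length < n := by
        simp at hlen
        simp [hL']
        omega
      exact ih L'.length hlt L' (fun p hp => hw p (List.mem_cons_of_mem x (List.mem_of_mem_drop hp)))
        rfl f' g' _ (by simp at hlen; omega) (by simp at hlen; omega)

-- MAIN INVARIANT: B's pass from a mid-batch state equals A's loop restarted after the current batch
theorem main_inv (max_ppl max_w : Int) (hmp : 1 ≤ max_ppl) :
    ∀ (L : List (Int × Int)) (c wt : Int) (fs : PySem.Set Int) (t : Int),
    (∀ p ∈ L, p.1 ≤ max_w) →
    (L.foldl (stepB max_ppl max_w) (c, wt, fs, t)).2.2.2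
      + (((L.foldl (stepB max_ppl max_w) (c, wt, fs, t)).2.2.1).length : Int) + 1
    = loopA max_ppl max_w (L.drop (twA max_ppl max_w c wt L).length).length
        (L.drop (twA max_ppl max_w c wt L).length)
        (t + (((twA max_ppl max_w c wt L).foldl (fun s p => PySem.Set.add s p.2) fs).length : Int) + 1) := by
  intro L
  induction L with
  | nil => intro c wt fs t hw; simp [twA, loopA_nil]
  | cons x xs ih =>
    intro c wt fs t hw
    by_cases hc : c + 1 ≤ max_ppl ∧ wt + x.1 ≤ max_w
    · have hstep : stepB max_ppl max_w (c, wt, fs, t) x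
          = (c + 1, wt + x.1, PySem.Set.add fs x.2, t) := by
        simp [stepB, hc]
      have htw : twA max_ppl max_w c wt (x :: xs)
          = x :: twA max_ppl max_w (c + 1) (wt + x.1) xs := by
        simp only [twA]; rw [if_pos hc]
      simp only [List.foldl_cons, hstep, htw, List.length_cons, List.drop_succ_cons,
        List.foldl_cons]
      exact ih (c + 1) (wt + x.1) (PySem.Set.add fs x.2) t
        (fun p hp => hw p (List.mem_cons_of_mem x hp))
    · have hstep : stepB max_ppl max_w (c, wt, fs, t) x
          = (1, x.1, PySem.Set.add PySem.Set.empty x.2, t + (fs.length : Int) + 1) := by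
        simp only [stepB]; rw [if_neg hc]
      have htw : twA max_ppl max_w c wt (x :: xs) = [] := by
        simp only [twA]; rw [if_neg hc]
      have hx : x.1 ≤ max_w := hw x (by simp)
      have hbatch := twA_cons max_ppl max_w hmp x hx xs
      rw [htw]
      simp only [List.length_nil, List.drop_zero, List.foldl_nil, List.foldl_cons, hstep]
      -- unfold one round of A's loop on the right
      conv_rhs => rw [List.length_cons, loopA_succ]
      rw [if_pos (by simp)]
      simp only [hbatch, List.length_cons, List.drop_succ_cons, List.map_cons]
      rw [ih 1 x.1 (PySem.Set.add PySem.Set.empty x.2) (t + (fs.length : Int) + 1)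
        (fun p hp => hw p (List.mem_cons_of_mem x hp))]
      have hfuel : ∀ T : Int,
          loopA max_ppl max_w (xs.drop (twA max_ppl max_w 1 x.1 xs).length).length
            (xs.drop (twA max_ppl max_w 1 x.1 xs).length) T
          = loopA max_ppl max_w xs.length
            (xs.drop (twA max_ppl max_w 1 x.1 xs).length) T := fun T =>
        loopA_fuel max_ppl max_w hmp _ _
          (fun p hp => hw p (List.mem_cons_of_mem x (List.mem_of_mem_drop hp))) rfl
          _ xs.length T (le_refl _) (by simp)
      -- identical trips argument, different fuel: renormalise with loopA_fuel
      have harg : PySem.Set.ofList (x.2 :: (twA max_ppl max_w 1 x.1 xs).map (·.2))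
          = (twA max_ppl max_w 1 x.1 xs).foldl (fun s p => PySem.Set.add s p.2)
              (PySem.Set.add PySem.Set.empty x.2) := by
        simp only [PySem.Set.ofList_eq_foldl, List.foldl_cons, List.foldl_map]
        rfl
      rw [← harg, hfuel]

-- zip against the full second list ignores the slice A takes first
theorem zip_take_len {α β : Type} : ∀ (xs : List α) (ys : List β),
    (xs.take ys.length).zip ys = xs.zip ys := by
  intro xs
  induction xs with
  | nil => intro ys; simp
  | cons x xs ih =>
    intro ys
    cases ys with
    | nil => simp
    | cons y ys =>
      simp only [List.length_cons, List.take_succ_cons, List.zip_cons_cons, ih ys]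

-- ===== VERDICT (by name: the statement is the Claim_ definition above) =====
theorem elevator_trips_spec : Claim_equal_elevator_trips := by
  intro pw pf ef mp mw _hdom hpre
  unfold Spec_elevator_trips elevator_trips elevator_trips_alt
  by_cases hE : pw.length = 0 ∨ pf.length = 0
  · rw [if_pos hE, if_pos hE]
  · rw [if_neg hE, if_neg hE]
    have hPre : (∀ w ∈ pw, w ≤ mw) ∧ 1 ≤ mp := by
      rcases hpre with h | h
      · exfalso; apply hE; rcases h with h | h <;> simp [h]
      · exact h
    obtain ⟨hwle, hmp⟩ := hPre
    have hany : pw.any (fun w => w > mw) = false := by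
      simp only [List.any_eq_false]
      intro w hwmem
      simpa using hwle w hwmem
    rw [if_neg (by simp [hany]), if_neg (by simp [hany])]
    have hslice : PySem.List.slice pw none (some (pf.length : Int)) = pw.take pf.length :=
      PySem.List.slice_to_natCast pw pf.length
    simp only [hslice, zip_take_len pw pf]
    obtain ⟨L, hL⟩ : ∃ L, PySem.List.sorted2 (pw.zip pf) (fun p => p.1) (fun p => p.2) = L :=
      ⟨_, rfl⟩
    rw [hL]
    have hperm : L.Perm (pw.zip pf) := hL ▸ PySem.List.sorted2_perm _ _ _ _
    have hwL : ∀ p ∈ L, p.1 ≤ mw := by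
      intro p hp
      exact hwle p.1 (List.of_mem_zip (hperm.mem_iff.mp hp)).1
    have hLne : L ≠ [] := by
      intro h
      have : (pw.zip pf).length = 0 := by rw [← hperm.length_eq, h]; rfl
      simp only [List.length_zip] at this
      omega
    obtain ⟨x, xs, rfl⟩ := List.exists_cons_of_ne_nil hLne
    have hbatch := twA_cons mp mw hmp x (hwL x (by simp)) xs
    -- unfold one round of A's loop (the left-hand side)
    conv_lhs => rw [List.length_cons, loopA_succ]
    rw [if_pos (by simp)]
    -- B's side via the invariant
    rw [main_inv mp mw hmp (x :: xs) 0 0 PySem.Set.empty 0 hwL]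
    simp only [hbatch, List.length_cons, List.drop_succ_cons, List.map_cons, List.foldl_cons]
    have harg : PySem.Set.ofList (x.2 :: (twA mp mw 1 x.1 xs).map (·.2))
        = (twA mp mw 1 x.1 xs).foldl (fun s p => PySem.Set.add s p.2)
            (PySem.Set.add PySem.Set.empty x.2) := by
      simp only [PySem.Set.ofList_eq_foldl, List.foldl_cons, List.foldl_map]
      rfl
    have hfuel : ∀ T : Int,
        loopA mp mw (xs.drop (twA mp mw 1 x.1 xs).length).length
          (xs.drop (twA mp mw 1 x.1 xs).length) T
        = loopA mp mw xs.length (xs.drop (twA mp mw 1 x.1 xs).length) T := fun T =>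
      loopA_fuel mp mw hmp _ _
        (fun p hp => hwL p (List.mem_cons_of_mem x (List.mem_of_mem_drop hp))) rfl
        _ xs.length T (le_refl _) (by simp)
    rw [← harg, hfuel]
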